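-- pv_equiv track=rewrite | github.com/Segundo-Volante/soccer-annotation-tool | backend/formation_utils.py | _formation_row_names
-- ===== SOURCE A (Python) =====
-- def _formation_row_names(row_sizes: list[int]) -> list[str]:
--     """Map each formation segment to a position bucket name.
--
--     General rule: first segment = defense, last = forward,
--     everything in between = midfield.
--
--     ``[4, 4, 2]``   → ``["defense", "midfield", "forward"]``
--     ``[4, 2, 3, 1]`` → ``["defense", "midfield", "midfield", "forward"]``
--     """
--     n = len(row_sizes)
--     if n == 0:
--         return []
--     if n == 1:
--         return ["defense"]
--     names: list[str] = []
--     for i in range(n):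
--         if i == 0:
--             names.append("defense")
--         elif i == n - 1:
--             names.append("forward")
--         else:
--             names.append("midfield")
--     return names
-- ===== SOURCE B (Python) =====
-- def _formation_row_names(row_sizes: list[int]) -> list[str]:
--     """Closed form: the result is always the concatenation
--     min(n,1) x 'defense' + (n-2) x 'midfield' + min(n-1,1) x 'forward',
--     computed arithmetically with no loop or branching."""
--     n = len(row_sizes)
--     return (["defense"] * min(n, 1)
--             + ["midfield"] * (n - 2)
--             + ["forward"] * min(n - 1, 1))
-- ===== Notes on version B (the rewrite author's own statement) =====
-- stated objective: alternative
-- what changed: Replaces A's per-index branching loop over range(n) (with n==0/n==1 guards) by a branch-free closed form: concatenate min(n,1) copies of 'defense', n-2 of 'midfield' and min(n-1,1) of 'forward', computed purely from the length.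
import Mathlib
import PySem

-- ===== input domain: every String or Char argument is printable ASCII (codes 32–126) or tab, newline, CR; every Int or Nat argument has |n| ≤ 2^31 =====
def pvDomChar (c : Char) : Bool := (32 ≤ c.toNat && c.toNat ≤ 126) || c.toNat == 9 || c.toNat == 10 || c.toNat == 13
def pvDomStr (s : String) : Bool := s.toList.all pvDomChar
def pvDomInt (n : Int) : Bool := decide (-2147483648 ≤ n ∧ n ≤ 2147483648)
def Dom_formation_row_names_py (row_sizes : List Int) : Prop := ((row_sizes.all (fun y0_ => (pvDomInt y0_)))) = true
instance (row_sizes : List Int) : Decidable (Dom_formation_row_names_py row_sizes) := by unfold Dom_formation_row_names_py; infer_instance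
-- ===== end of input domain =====

-- B replaces A's per-index branching loop (with its n==0/n==1 guards) by a branch-free
-- closed form: concatenation of replicated segments computed from the length (objective: alternative).

-- ===== PORT A =====
def formation_row_names_py (row_sizes : List Int) : List String :=
  let n := row_sizes.length
  if n = 0 then []
  else if n = 1 then ["defense"]
  else
    (PySem.List.pyRange 0 (n : Int) 1).foldl
      (fun names i =>
        if i = 0 then names ++ ["defense"]
        else if i = (n : Int) - 1 then names ++ ["forward"]
        else names ++ ["midfield"]) []

-- ===== PORT B =====
def formation_row_names_py_alt (row_sizes : List Int) : List String :=
  let n := row_sizes.length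
  List.replicate (min n 1) "defense"
    ++ List.replicate (n - 2) "midfield"
    ++ List.replicate (min (n - 1) 1) "forward"

-- ===== PRECONDITION & SPEC =====
def Spec_formation_row_names_py (row_sizes : List Int) (out : List String) : Prop := out = formation_row_names_py_alt row_sizes
instance (row_sizes : List Int) (out : List String) : Decidable (Spec_formation_row_names_py row_sizes out) := by unfold Spec_formation_row_names_py; infer_instance

-- ===== CLAIM (what is proved, stated in full; the proofs are below) =====
def Claim_equal_formation_row_names_py : Prop := ∀ (row_sizes : List Int), Dom_formation_row_names_py row_sizes → Spec_formation_row_names_py row_sizes (formation_row_names_py row_sizes)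

-- ===== LEMMAS AND PROOFS =====

-- A's loop over range(n) appended one name per index: as a map over List.range n.
lemma a_fold (n : Nat) :
    ((PySem.List.pyRange 0 (n : Int) 1).foldl
      (fun names i =>
        if i = 0 then names ++ ["defense"]
        else if i = (n : Int) - 1 then names ++ ["forward"]
        else names ++ ["midfield"]) []) =
    (List.range n).map
      (fun i => if i = 0 then "defense" else if i = n - 1 then "forward" else "midfield") := by
  rw [PySem.List.pyRange_zero_natCast, List.foldl_map]
  rw [show (fun (x : List String) (y : Nat) =>
        if (y : Int) = 0 then x ++ ["defense"]
        else if (y : Int) = (n : Int) - 1 then x ++ ["forward"]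
        else x ++ ["midfield"]) =
      (fun (x : List String) (y : Nat) => x ++
        [if (y : Int) = 0 then "defense"
         else if (y : Int) = (n : Int) - 1 then "forward"
         else "midfield"]) from by funext x y; split_ifs <;> rfl]
  rw [PySem.List.foldl_append_singleton_eq_map, List.nil_append]
  apply List.map_congr_left
  intro i hi
  simp only [List.mem_range] at hi
  split_ifs <;> simp_all <;> omega

-- closed form of A's port
lemma a_closed (row_sizes : List Int) :
    formation_row_names_py row_sizes =
      (List.range row_sizes.length).map
        (fun i => if i = 0 then "defense"
                  else if i = row_sizes.length - 1 then "forward" else "midfield") := by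
  simp only [formation_row_names_py]
  rcases row_sizes with _ | ⟨a, _ | ⟨b, rest⟩⟩
  · simp
  · simp
  · simp only [List.length_cons]
    have hn : (rest.length + 1 + 1) ≠ 0 := by omega
    have hn1 : (rest.length + 1 + 1) ≠ 1 := by omega
    simp only [hn, hn1, if_false]
    exact a_fold (rest.length + 1 + 1)

-- B's concatenation of replicated segments equals the same closed map form
lemma alt_closed (row_sizes : List Int) :
    formation_row_names_py_alt row_sizes =
      (List.range row_sizes.length).map
        (fun i => if i = 0 then "defense"
                  else if i = row_sizes.length - 1 then "forward" else "midfield") := by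
  simp only [formation_row_names_py_alt]
  apply List.ext_getElem
  · simp only [List.length_append, List.length_replicate, List.length_map, List.length_range]
    omega
  · intro i h1 h2
    simp only [List.length_map, List.length_range] at h2
    simp only [List.getElem_append, List.length_append, List.length_replicate,
      List.getElem_replicate, List.getElem_map, List.getElem_range]
    split_ifs <;> first | rfl | (exfalso; omega)

-- ===== VERDICT (by name: the statement is the Claim_ definition above) =====
theorem formation_row_names_py_spec : Claim_equal_formation_row_names_py := by
  intro row_sizes _
  unfold Spec_formation_row_names_py
  rw [a_closed, alt_closed]
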